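-- pv_equiv track=rewrite | github.com/MLSysBook/TinyTorch | milestones/05_2017_transformer/tinytalks_chatbot.py | decode_tokens
-- ===== SOURCE A (Python) =====
-- def decode_tokens(tokens, idx_to_char, stop_at_eos=True):
--     """Decode tokens to string."""
--     chars = []
--     for t in tokens:
--         if t == 0:  # PAD
--             if stop_at_eos:
--                 break
--         elif t == 1:  # SOS
--             continue
--         elif t == 2:  # SEP
--             chars.append(' | ')
--         elif t == 3:  # EOS
--             if stop_at_eos:
--                 break
--         else:
--             chars.append(idx_to_char.get(t, '?'))
--     return ''.join(chars)
-- ===== SOURCE B (Python) =====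
-- def decode_tokens(tokens, idx_to_char, stop_at_eos=True):
--     """Table-driven decode: extend the char map with the control codes once,
--     then the output is a pure lookup over the (possibly truncated) tokens."""
--     table = dict(idx_to_char)
--     table[1] = ''
--     table[2] = ' | '
--     if stop_at_eos:
--         stops = [i for i, t in enumerate(tokens) if t in (0, 3)]
--         if stops:
--             tokens = tokens[:stops[0]]
--     else:
--         table[0] = ''
--         table[3] = ''
--     return ''.join(table.get(t, '?') for t in tokens)
-- ===== Notes on version B (the rewrite author's own statement) =====
-- stated objective: alternative
-- what changed: B replaces A's branch-per-token loop by a translation table built once (the control codes 1/2, and 0/3 when not stopping, are folded into the dict as ''/' | ' entries) so the output pass is a pure table lookup per token, with the EOS cut found beforehand via an enumerate-based index list.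
import Mathlib
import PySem

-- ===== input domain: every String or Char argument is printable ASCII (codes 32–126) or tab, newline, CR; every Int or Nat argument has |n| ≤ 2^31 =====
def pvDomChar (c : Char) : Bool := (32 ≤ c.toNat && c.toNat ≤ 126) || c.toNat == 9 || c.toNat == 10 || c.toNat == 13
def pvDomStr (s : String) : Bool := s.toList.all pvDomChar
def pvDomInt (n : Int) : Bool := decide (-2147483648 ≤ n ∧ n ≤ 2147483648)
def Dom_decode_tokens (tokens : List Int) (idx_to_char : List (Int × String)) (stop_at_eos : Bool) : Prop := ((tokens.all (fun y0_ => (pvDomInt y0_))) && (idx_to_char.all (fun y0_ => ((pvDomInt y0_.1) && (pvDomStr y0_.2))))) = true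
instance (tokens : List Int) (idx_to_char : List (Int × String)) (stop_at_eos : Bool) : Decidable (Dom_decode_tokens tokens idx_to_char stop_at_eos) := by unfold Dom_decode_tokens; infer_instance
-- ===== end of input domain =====

-- B replaces A's branch-per-token loop by a precomputed translation table (control codes folded
-- into the dict) plus an enumerate-based cut-point search; alternative decomposition, same cost.


-- ===== PORT A =====
-- A's for-loop with break/continue: structural recursion over tokens carrying the chars accumulator
def decodeTokensLoop (stop : Bool) (d : PySem.Dict Int String) : List Int → List String → List String
  | [], chars => chars
  | t :: ts, chars =>
    if t = 0 then (if stop then chars else decodeTokensLoop stop d ts chars)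
    else if t = 1 then decodeTokensLoop stop d ts chars
    else if t = 2 then decodeTokensLoop stop d ts (chars ++ [" | "])
    else if t = 3 then (if stop then chars else decodeTokensLoop stop d ts chars)
    else decodeTokensLoop stop d ts (chars ++ [d.getD t "?"])

def decode_tokens (tokens : List Int) (idx_to_char : List (Int × String)) (stop_at_eos : Bool) : String :=
  PySem.Str.join "" (decodeTokensLoop stop_at_eos (PySem.Dict.mk idx_to_char) tokens [])

-- ===== PORT B =====
-- Source B: table = dict(idx_to_char); table[1]=''; table[2]=' | '; optional cut at first 0/3
-- (stops list via enumerate) or table[0]=table[3]=''; then ''.join of pure lookups.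
def decode_tokens_alt (tokens : List Int) (idx_to_char : List (Int × String)) (stop_at_eos : Bool) : String :=
  let table := ((PySem.Dict.mk idx_to_char).insert 1 "").insert 2 " | "
  let cfg : List Int × PySem.Dict Int String :=
    if stop_at_eos then
      (match ((PySem.List.enumerate tokens).filter (fun p => p.2 == 0 || p.2 == 3)).map (fun p => p.1) with
       | [] => tokens
       | i :: _ => PySem.List.slice tokens none (some i),
       table)
    else (tokens, (table.insert 0 "").insert 3 "")
  PySem.Str.join "" (cfg.1.map (fun t => cfg.2.getD t "?"))

-- ===== PRECONDITION & SPEC =====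
def Spec_decode_tokens (tokens : List Int) (idx_to_char : List (Int × String)) (stop_at_eos : Bool) (out : String) : Prop := out = decode_tokens_alt tokens idx_to_char stop_at_eos
instance (tokens : List Int) (idx_to_char : List (Int × String)) (stop_at_eos : Bool) (out : String) : Decidable (Spec_decode_tokens tokens idx_to_char stop_at_eos out) := by unfold Spec_decode_tokens; infer_instance

-- ===== CLAIM (what is proved, stated in full; the proofs are below) =====
def Claim_equal_decode_tokens : Prop := ∀ (tokens : List Int) (idx_to_char : List (Int × String)) (stop_at_eos : Bool), Dom_decode_tokens tokens idx_to_char stop_at_eos → Spec_decode_tokens tokens idx_to_char stop_at_eos (decode_tokens tokens idx_to_char stop_at_eos)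

-- ===== LEMMAS AND PROOFS =====

-- length of the prefix of tokens before the first 0/3 (proof-side characterisation of the cut)
def cutLen : List Int → Nat
  | [] => 0
  | t :: ts => if t = 0 ∨ t = 3 then 0 else cutLen ts + 1

lemma cutLen_prefix_no_stop : ∀ (ts : List Int), ∀ x ∈ ts.take (cutLen ts), x ≠ 0 ∧ x ≠ 3
  | [] => by simp [cutLen]
  | t :: ts => by
    by_cases h : t = 0 ∨ t = 3
    · simp [cutLen, h]
    · simp only [cutLen, if_neg h, List.take_succ_cons, List.mem_cons]
      rintro x (rfl | hx)
      · exact ⟨fun h0 => h (Or.inl h0), fun h3 => h (Or.inr h3)⟩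
      · exact cutLen_prefix_no_stop ts x hx

-- members of the stop-index list are ≥ the enumerate start
lemma stops_ge (Q : Int × Int → Bool) : ∀ (ts : List Int) (s i : Int),
    i ∈ ((PySem.List.enumerate ts s).filter Q).map (fun p => p.1) → s ≤ i := by
  intro ts s i hi
  obtain ⟨p, hp, rfl⟩ := List.mem_map.mp hi
  have hmem : p ∈ PySem.List.enumerate ts s := (List.mem_filter.mp hp).1
  have : p.1 ∈ (PySem.List.enumerate ts s).map (fun p => p.1) := List.mem_map_of_mem hmem
  rw [PySem.List.map_fst_enumerate] at this
  exact (PySem.List.mem_pyRange_one.mp this).1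

-- B's cut (first stop index, else whole list) computes the cutLen-prefix
lemma cut_eq : ∀ (ts : List Int) (s : Int),
    (match ((PySem.List.enumerate ts s).filter (fun p => p.2 == (0:Int) || p.2 == 3)).map (fun p => p.1) with
     | [] => ts
     | i :: _ => PySem.List.slice ts none (some (i - s))) = ts.take (cutLen ts)
  | [], s => by simp [PySem.List.enumerate_nil]
  | t :: ts, s => by
    rw [PySem.List.enumerate_cons]
    by_cases h : t = 0 ∨ t = 3
    · have hq : ((s, t).2 == (0:Int) || (s, t).2 == 3) = true := by
        rcases h with rfl | rfl <;> simp
      simp only [List.filter_cons, hq, if_pos, List.map_cons]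
      show PySem.List.slice (t :: ts) none (some (s - s)) = (t :: ts).take (cutLen (t :: ts))
      rw [show s - s = ((0:Nat) : Int) by omega, PySem.List.slice_to_natCast]
      have : cutLen (t :: ts) = 0 := by simp only [cutLen]; rw [if_pos h]
      rw [this]
    · have hq : ((s, t).2 == (0:Int) || (s, t).2 == 3) = false := by
        simp only [not_or] at h
        simp [h.1, h.2]
      simp only [List.filter_cons, hq, Bool.false_eq_true, if_neg, not_false_iff]
      have hc : cutLen (t :: ts) = cutLen ts + 1 := by simp only [cutLen]; rw [if_neg h]
      cases hs : ((PySem.List.enumerate ts (s+1)).filter (fun p => p.2 == (0:Int) || p.2 == 3)).map (fun p => p.1) with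
      | nil =>
        have ih := cut_eq ts (s+1); rw [hs] at ih
        have ih' : ts = ts.take (cutLen ts) := ih
        show t :: ts = (t :: ts).take (cutLen (t :: ts))
        rw [hc, List.take_succ_cons, ← ih']
      | cons i rest =>
        have hge : s + 1 ≤ i := stops_ge _ ts (s+1) i (by rw [hs]; exact List.mem_cons_self ..)
        have ih := cut_eq ts (s+1); rw [hs] at ih
        have ih' : PySem.List.slice ts none (some (i - (s+1))) = ts.take (cutLen ts) := ih
        show PySem.List.slice (t :: ts) none (some (i - s)) = (t :: ts).take (cutLen (t :: ts))
        rw [show i - (s+1) = (((i - (s+1)).toNat : Nat) : Int) by omega,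
          PySem.List.slice_to_natCast] at ih'
        rw [show i - s = (((i - s).toNat : Nat) : Int) by omega, PySem.List.slice_to_natCast,
          show (i - s).toNat = (i - (s+1)).toNat + 1 by omega,
          List.take_succ_cons, ih', hc, List.take_succ_cons]

lemma joinE : ∀ (L : List (List Char)), PySem.Chars.join [] L = L.flatten
  | [] => by simp [PySem.Chars.join_nil]
  | [p] => by simp [PySem.Chars.join_singleton]
  | p :: q :: rest => by
    rw [PySem.Chars.join_cons_cons, joinE (q :: rest)]; simp

-- dropping via a filter equals mapping the dropped elements to the empty string
lemma flat_filter : ∀ (l : List Int) (P : Int → Bool) (f g : Int → List Char),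
    (∀ t ∈ l, if P t then g t = f t else g t = []) →
    ((l.filter P).map f).flatten = (l.map g).flatten
  | [], _, _, _, _ => rfl
  | t :: ts, P, f, g, h => by
    have ht := h t (List.mem_cons_self ..)
    have ih := flat_filter ts P f g (fun x hx => h x (List.mem_cons_of_mem _ hx))
    by_cases hp : P t = true
    · simp only [List.filter_cons, hp, if_pos, List.map_cons, List.flatten_cons, ih]
      rw [if_pos hp] at ht; rw [ht]
    · simp only [List.filter_cons, hp, Bool.false_eq_true, if_neg, not_false_iff, List.map_cons,
        List.flatten_cons, ih]
      rw [if_neg hp] at ht; rw [ht, List.nil_append]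

lemma join_congr_flat (L1 L2 : List String)
    (h : ((L1.map String.toList).flatten) = ((L2.map String.toList).flatten)) :
    PySem.Str.join "" L1 = PySem.Str.join "" L2 := by
  have h1 := PySem.Str.toList_join "" L1
  have h2 := PySem.Str.toList_join "" L2
  apply String.toList_inj.mp
  rw [h1, h2]
  simpa [joinE] using h

-- A's loop in map/filter form, stop_at_eos = true
lemma loop_true (d : PySem.Dict Int String) : ∀ (ts : List Int) (chars : List String),
    decodeTokensLoop true d ts chars =
      chars ++ ((ts.take (cutLen ts)).filter (fun t => t != 1)).map
        (fun t => if t = 2 then " | " else d.getD t "?")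
  | [], chars => by simp [decodeTokensLoop, cutLen]
  | t :: ts, chars => by
    by_cases h0 : t = 0
    · simp [decodeTokensLoop, cutLen, h0]
    by_cases h1 : t = 1
    · simp [decodeTokensLoop, cutLen, h1, loop_true d ts chars]
    by_cases h2 : t = 2
    · simp [decodeTokensLoop, cutLen, h2, loop_true d ts (chars ++ [" | "])]
    by_cases h3 : t = 3
    · simp [decodeTokensLoop, cutLen, h3]
    · simp [decodeTokensLoop, cutLen, h0, h1, h2, h3,
        loop_true d ts (chars ++ [d.getD t "?"])]

-- A's loop in map/filter form, stop_at_eos = false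
lemma loop_false (d : PySem.Dict Int String) : ∀ (ts : List Int) (chars : List String),
    decodeTokensLoop false d ts chars =
      chars ++ (ts.filter (fun t => t != 0 && t != 1 && t != 3)).map
        (fun t => if t = 2 then " | " else d.getD t "?")
  | [], chars => by simp [decodeTokensLoop]
  | t :: ts, chars => by
    by_cases h0 : t = 0
    · simp [decodeTokensLoop, h0, loop_false d ts chars]
    by_cases h1 : t = 1
    · simp [decodeTokensLoop, h1, loop_false d ts chars]
    by_cases h2 : t = 2
    · simp [decodeTokensLoop, h2, loop_false d ts (chars ++ [" | "])]
    by_cases h3 : t = 3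
    · simp [decodeTokensLoop, h3, loop_false d ts chars]
    · simp [decodeTokensLoop, h0, h1, h2, h3,
        loop_false d ts (chars ++ [d.getD t "?"])]

-- ===== VERDICT (by name: the statement is the Claim_ definition above) =====
theorem decode_tokens_spec : Claim_equal_decode_tokens := by
  intro tokens idx_to_char stop _
  unfold Spec_decode_tokens decode_tokens decode_tokens_alt
  set d := PySem.Dict.mk idx_to_char with hd
  cases stop with
  | true =>
    simp only [if_pos]
    have hcut := cut_eq tokens 0
    simp only [sub_zero] at hcut
    rw [loop_true d tokens [], List.nil_append, hcut]
    apply join_congr_flat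
    rw [List.map_map, List.map_map]
    apply flat_filter
    intro t ht
    have hns := cutLen_prefix_no_stop tokens t ht
    by_cases h1 : t = 1
    · simp [h1, PySem.Dict.getD_insert]
    by_cases h2 : t = 2
    · simp [h2, PySem.Dict.getD_insert]
    · simp [h1, h2, PySem.Dict.getD_insert]
  | false =>
    simp only [Bool.false_eq_true, if_neg, not_false_iff]
    rw [loop_false d tokens [], List.nil_append]
    apply join_congr_flat
    rw [List.map_map, List.map_map]
    apply flat_filter
    intro t _
    by_cases h0 : t = 0
    · simp [h0, PySem.Dict.getD_insert]
    by_cases h1 : t = 1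
    · simp [h1, PySem.Dict.getD_insert]
    by_cases h2 : t = 2
    · simp [h2, PySem.Dict.getD_insert]
    by_cases h3 : t = 3
    · simp [h3, PySem.Dict.getD_insert]
    · simp [h0, h1, h2, h3, PySem.Dict.getD_insert]
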